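-- pv_equiv track=rewrite | github.com/XuhXie/NLPTools | Dataprocess/Chinese_FenZi.py | split_char
-- ===== SOURCE A (Python) =====
-- def split_char(str_, tag='[unk]', relapce=True):
--     english = 'abcdefghijklmnopqrstuvwxyz0123456789'
--     output = []
--     buffer = ''
--     replace_list = []
--     for s in str_:
--         if s in english or s in english.upper():  # 英文或数字
--             buffer += s
--         else:  # 中文
--             if buffer:
--                 if len(buffer) > 1 and relapce:
--                     output.append(tag)
--                     replace_list.append(buffer)
--                 else:
--                     output.append(buffer)
--             buffer = ''
--             output.append(s)
--
--     if buffer: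
--         if len(buffer) > 1 and relapce:
--             output.append(tag)
--             replace_list.append(buffer)
--         else:
--             output.append(buffer)
--     #     if (len(replace_list) < 1):
--     #         replace_list = ['[NONE]']
--     if relapce:
--         return output, replace_list
--     return output
-- ===== SOURCE B (Python) =====
-- def split_char(str_, tag='[unk]', relapce=True):
--     def _alnum(c):
--         return ('a' <= c <= 'z') or ('A' <= c <= 'Z') or ('0' <= c <= '9')
--     # phase 1: tokenize into maximal alnum runs and single other chars
--     tokens = []
--     i, n = 0, len(str_)
--     while i < n:
--         if _alnum(str_[i]):
--             j = i
--             while j < n and _alnum(str_[j]):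
--                 j += 1
--             tokens.append(str_[i:j])
--             i = j
--         else:
--             tokens.append(str_[i])
--             i += 1
--     # phase 2: classify tokens
--     output = []
--     replace_list = []
--     for t in tokens:
--         if relapce and len(t) > 1:
--             output.append(tag)
--             replace_list.append(t)
--         else:
--             output.append(t)
--     if relapce:
--         return output, replace_list
--     return output
-- ===== Notes on version B (the rewrite author's own statement) =====
-- stated objective: simpler
-- what changed: B tokenizes the string first (maximal [A-Za-z0-9] runs vs single other chars) and then classifies the tokens in a second pass, instead of A's single pass that threads a mutable buffer and flushes it in two duplicated places.
-- outside the precondition, e.g. on split_char('ab', '[unk]', False): A returns ('ab',), B returns ('ab',)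
import Mathlib
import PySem

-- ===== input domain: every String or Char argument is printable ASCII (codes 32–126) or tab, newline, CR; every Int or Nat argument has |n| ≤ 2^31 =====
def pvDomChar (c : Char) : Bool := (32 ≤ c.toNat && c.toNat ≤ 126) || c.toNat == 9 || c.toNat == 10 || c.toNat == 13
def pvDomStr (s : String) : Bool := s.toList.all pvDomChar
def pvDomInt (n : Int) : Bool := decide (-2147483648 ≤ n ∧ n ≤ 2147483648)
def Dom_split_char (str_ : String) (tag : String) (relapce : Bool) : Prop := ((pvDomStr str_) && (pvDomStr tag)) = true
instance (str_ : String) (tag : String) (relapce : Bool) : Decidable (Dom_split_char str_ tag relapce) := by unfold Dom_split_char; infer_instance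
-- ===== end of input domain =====

-- B tokenizes the string first (maximal [A-Za-z0-9] runs vs single other chars) and classifies
-- the tokens in a second pass, instead of A's single pass threading a mutable buffer: simpler decomposition.


-- ===== PORT A =====
def pvEnglish : String := "abcdefghijklmnopqrstuvwxyz0123456789"

-- `s in english or s in english.upper()`: single-char membership in the two strings
def pvInEnglish (c : Char) : Bool :=
  pvEnglish.toList.contains c || (PySem.Str.upper pvEnglish).toList.contains c

-- the duplicated `if buffer:` flush block of A (appears twice in the Python, used twice here)
def pvFlush (tag : String) (relapce : Bool) (out : List String) (buf : List Char)
    (rep : List String) : List String × List String :=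
  if buf ≠ [] then
    if buf.length > 1 && relapce then (out ++ [tag], rep ++ [String.mk buf])
    else (out ++ [String.mk buf], rep)
  else (out, rep)

def pvStepA (tag : String) (relapce : Bool) (st : List String × List Char × List String)
    (c : Char) : List String × List Char × List String :=
  let (out, buf, rep) := st
  if pvInEnglish c then (out, buf ++ [c], rep)
  else
    let (out, rep) := pvFlush tag relapce out buf rep
    (out ++ [String.mk [c]], [], rep)

def split_char (str_ : String) (tag : String) (relapce : Bool) : List String × List String :=
  let (out, buf, rep) := str_.toList.foldl (pvStepA tag relapce) ([], [], [])
  let (out, rep) := pvFlush tag relapce out buf rep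
  if relapce then (out, rep)
  else (out, rep)  -- Python returns the bare list `out` here (no pair); Pre_ excludes relapce = false

-- ===== PORT B =====
def pvAlnum (c : Char) : Bool :=
  ('a' ≤ c && c ≤ 'z') || ('A' ≤ c && c ≤ 'Z') || ('0' ≤ c && c ≤ '9')

-- phase 1 of Source B: maximal alnum runs (the inner `while j` scan) vs single other chars
def pvTokenize : List Char → List (List Char)
  | [] => []
  | c :: rest =>
    if pvAlnum c then
      (c :: rest.takeWhile pvAlnum) :: pvTokenize (rest.dropWhile pvAlnum)
    else [c] :: pvTokenize rest
termination_by cs => cs.length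
decreasing_by
  · simpa using Nat.lt_succ_of_le (List.length_dropWhile_le pvAlnum rest)
  · simp

-- phase 2 of Source B: classify one token
def pvEmit (tag : String) (relapce : Bool) (p : List String × List String)
    (t : List Char) : List String × List String :=
  if relapce && t.length > 1 then (p.1 ++ [tag], p.2 ++ [String.mk t])
  else (p.1 ++ [String.mk t], p.2)

def split_char_alt (str_ : String) (tag : String) (relapce : Bool) : List String × List String :=
  let (out, rep) := (pvTokenize str_.toList).foldl (pvEmit tag relapce) ([], [])
  if relapce then (out, rep)
  else (out, rep)  -- Python returns the bare list `out` here (no pair); Pre_ excludes relapce = false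

-- ===== PRECONDITION & SPEC =====
-- Pre_ excludes relapce = false: there Python A returns a bare list, not a pair
-- (output, replace_list) of the declared return type, so no pair value can be claimed for it.
def Pre_split_char (str_ : String) (tag : String) (relapce : Bool) : Prop := relapce = true
instance (str_ : String) (tag : String) (relapce : Bool) : Decidable (Pre_split_char str_ tag relapce) := by unfold Pre_split_char; infer_instance

def pvWitness_split_char : String × String × Bool := ("ab c7d!", "[unk]", true)

def Spec_split_char (str_ : String) (tag : String) (relapce : Bool) (out : List String × List String) : Prop := out = split_char_alt str_ tag relapce
instance (str_ : String) (tag : String) (relapce : Bool) (out : List String × List String) : Decidable (Spec_split_char str_ tag relapce out) := by unfold Spec_split_char; infer_instance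

-- ===== CLAIM (what is proved, stated in full; the proofs are below) =====
def Claim_equal_split_char : Prop := ∀ (str_ : String) (tag : String) (relapce : Bool), Dom_split_char str_ tag relapce → Pre_split_char str_ tag relapce → Spec_split_char str_ tag relapce (split_char str_ tag relapce)

-- ===== LEMMAS AND PROOFS =====

theorem pvCharLe (a b : Char) : (a ≤ b) ↔ a.toNat ≤ b.toNat := by
  simp only [Char.le_def, UInt32.le_iff_toNat_le, Char.toNat_val]

theorem pvCharEq (a b : Char) : (a = b) ↔ a.toNat = b.toNat := by
  constructor
  · intro h; rw [h]
  · intro h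
    have := congrArg Char.ofNat h
    simpa [Char.ofNat_toNat] using this

-- the two ports classify every character identically
theorem pvInEnglish_eq (c : Char) : pvInEnglish c = pvAlnum c := by
  have h1 : pvEnglish.toList = ['a', 'b', 'c', 'd', 'e', 'f', 'g', 'h', 'i', 'j', 'k', 'l', 'm', 'n', 'o', 'p', 'q', 'r', 's', 't', 'u', 'v', 'w', 'x', 'y', 'z', '0', '1', '2', '3', '4', '5', '6', '7', '8', '9'] := rfl
  have h2 : (PySem.Str.upper pvEnglish).toList = ['A', 'B', 'C', 'D', 'E', 'F', 'G', 'H', 'I', 'J', 'K', 'L', 'M', 'N', 'O', 'P', 'Q', 'R', 'S', 'T', 'U', 'V', 'W', 'X', 'Y', 'Z', '0', '1', '2', '3', '4', '5', '6', '7', '8', '9'] := rfl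
  rw [Bool.eq_iff_iff]
  simp only [pvInEnglish, pvAlnum, h1, h2, List.contains_eq_mem, decide_eq_true_eq,
    Bool.or_eq_true, Bool.and_eq_true, List.mem_cons, List.not_mem_nil, or_false,
    pvCharEq, pvCharLe,
    show ('0').toNat = 48 from rfl,
    show ('1').toNat = 49 from rfl,
    show ('2').toNat = 50 from rfl,
    show ('3').toNat = 51 from rfl,
    show ('4').toNat = 52 from rfl,
    show ('5').toNat = 53 from rfl,
    show ('6').toNat = 54 from rfl,
    show ('7').toNat = 55 from rfl,
    show ('8').toNat = 56 from rfl,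
    show ('9').toNat = 57 from rfl,
    show ('A').toNat = 65 from rfl,
    show ('B').toNat = 66 from rfl,
    show ('C').toNat = 67 from rfl,
    show ('D').toNat = 68 from rfl,
    show ('E').toNat = 69 from rfl,
    show ('F').toNat = 70 from rfl,
    show ('G').toNat = 71 from rfl,
    show ('H').toNat = 72 from rfl,
    show ('I').toNat = 73 from rfl,
    show ('J').toNat = 74 from rfl,
    show ('K').toNat = 75 from rfl,
    show ('L').toNat = 76 from rfl,
    show ('M').toNat = 77 from rfl,
    show ('N').toNat = 78 from rfl,
    show ('O').toNat = 79 from rfl,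
    show ('P').toNat = 80 from rfl,
    show ('Q').toNat = 81 from rfl,
    show ('R').toNat = 82 from rfl,
    show ('S').toNat = 83 from rfl,
    show ('T').toNat = 84 from rfl,
    show ('U').toNat = 85 from rfl,
    show ('V').toNat = 86 from rfl,
    show ('W').toNat = 87 from rfl,
    show ('X').toNat = 88 from rfl,
    show ('Y').toNat = 89 from rfl,
    show ('Z').toNat = 90 from rfl,
    show ('a').toNat = 97 from rfl,
    show ('b').toNat = 98 from rfl,
    show ('c').toNat = 99 from rfl,
    show ('d').toNat = 100 from rfl,
    show ('e').toNat = 101 from rfl,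
    show ('f').toNat = 102 from rfl,
    show ('g').toNat = 103 from rfl,
    show ('h').toNat = 104 from rfl,
    show ('i').toNat = 105 from rfl,
    show ('j').toNat = 106 from rfl,
    show ('k').toNat = 107 from rfl,
    show ('l').toNat = 108 from rfl,
    show ('m').toNat = 109 from rfl,
    show ('n').toNat = 110 from rfl,
    show ('o').toNat = 111 from rfl,
    show ('p').toNat = 112 from rfl,
    show ('q').toNat = 113 from rfl,
    show ('r').toNat = 114 from rfl,
    show ('s').toNat = 115 from rfl,
    show ('t').toNat = 116 from rfl,
    show ('u').toNat = 117 from rfl,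
    show ('v').toNat = 118 from rfl,
    show ('w').toNat = 119 from rfl,
    show ('x').toNat = 120 from rfl,
    show ('y').toNat = 121 from rfl,
    show ('z').toNat = 122 from rfl]
  omega

-- B's token list as seen mid-loop of A: the pending buffer merged with the next alnum run
def pvTokensPre (buf : List Char) (cs : List Char) : List (List Char) :=
  if buf = [] then pvTokenize cs
  else (buf ++ cs.takeWhile pvAlnum) :: pvTokenize (cs.dropWhile pvAlnum)

theorem pvTokensPre_cons_alnum (buf : List Char) (c : Char) (cs : List Char)
    (h : pvAlnum c = true) : pvTokensPre buf (c :: cs) = pvTokensPre (buf ++ [c]) cs := by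
  by_cases hbuf : buf = [] <;>
    simp [pvTokensPre, hbuf, pvTokenize, List.takeWhile_cons, List.dropWhile_cons, h]

theorem pvTokenize_nil : pvTokenize [] = [] := by
  rw [pvTokenize]

theorem pvTokenize_cons (c : Char) (cs : List Char) :
    pvTokenize (c :: cs)
      = if pvAlnum c then (c :: cs.takeWhile pvAlnum) :: pvTokenize (cs.dropWhile pvAlnum)
        else [c] :: pvTokenize cs := by
  rw [pvTokenize]

theorem pvMain (tag : String) (relapce : Bool) (cs : List Char) :
    ∀ (buf : List Char) (out rep : List String),
      (fun st => pvFlush tag relapce st.1 st.2.1 st.2.2)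
          (cs.foldl (pvStepA tag relapce) (out, buf, rep))
        = (pvTokensPre buf cs).foldl (pvEmit tag relapce) (out, rep) := by
  induction cs with
  | nil =>
    intro buf out rep
    by_cases hbuf : buf = []
    · simp [pvTokensPre, pvFlush, hbuf, pvTokenize_nil]
    · simp [pvTokensPre, pvFlush, pvEmit, hbuf, Bool.and_comm, pvTokenize_nil]
  | cons c cs ih =>
    intro buf out rep
    by_cases hc : pvInEnglish c = true
    · have ha : pvAlnum c = true := by rw [← pvInEnglish_eq]; exact hc
      have hstep : pvStepA tag relapce (out, buf, rep) c = (out, buf ++ [c], rep) := by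
        simp [pvStepA, hc]
      rw [List.foldl_cons, hstep, ih (buf ++ [c]) out rep,
        pvTokensPre_cons_alnum buf c cs ha]
    · have ha : pvAlnum c = false := by rw [← pvInEnglish_eq]; simpa using hc
      rcases hfl : pvFlush tag relapce out buf rep with ⟨o1, r1⟩
      have hstep : pvStepA tag relapce (out, buf, rep) c
          = (o1 ++ [String.mk [c]], [], r1) := by
        simp [pvStepA, hc, hfl]
      rw [List.foldl_cons, hstep, ih [] (o1 ++ [String.mk [c]]) r1]
      by_cases hbuf : buf = []
      · subst hbuf
        have h2 : (out, rep) = (o1, r1) := by rw [← hfl]; simp [pvFlush]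
        have ht : pvTokenize (c :: cs) = [c] :: pvTokenize cs := by
          rw [pvTokenize_cons]; simp [ha]
        have ho : out = o1 := congrArg Prod.fst h2
        have hr : rep = r1 := congrArg Prod.snd h2
        simp only [pvTokensPre, ite_true, ht, List.foldl_cons, ho, hr]
        simp [pvEmit]
      · have hflush_emit : pvEmit tag relapce (out, rep) buf = (o1, r1) := by
          rw [← hfl]
          simp only [pvFlush, pvEmit, if_pos hbuf, Bool.and_comm]
        simp only [pvTokensPre, if_neg hbuf, List.takeWhile_cons, List.dropWhile_cons, ha,
          Bool.false_eq_true, if_false, List.append_nil]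
        rw [pvTokenize_cons]
        simp only [ha, Bool.false_eq_true, if_false]
        rw [List.foldl_cons, hflush_emit, List.foldl_cons]
        have h1 : pvEmit tag relapce (o1, r1) [c] = (o1 ++ [String.mk [c]], r1) := by
          simp [pvEmit]
        rw [h1]
        rfl

-- ===== VERDICT (by name: the statement is the Claim_ definition above) =====
theorem split_char_spec : Claim_equal_split_char := by
  unfold Claim_equal_split_char
  intro s tag relapce _hdom hpre
  unfold Pre_split_char at hpre
  subst hpre
  unfold Spec_split_char split_char split_char_alt
  have h := pvMain tag true s.toList [] [] []
  rcases hA : s.toList.foldl (pvStepA tag true) ([], [], []) with ⟨o, b, r⟩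
  rw [hA] at h
  simp only at h
  have h' : pvFlush tag true o b r
      = (pvTokenize s.toList).foldl (pvEmit tag true) ([], []) := by
    rw [h]; simp [pvTokensPre]
  rcases hB : (pvTokenize s.toList).foldl (pvEmit tag true) ([], []) with ⟨o2, r2⟩
  rw [hB] at h'
  simp [h']
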